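-- pv_equiv track=rewrite | github.com/eunice730711/NLG-Evaluation | evaluation.py | meteor_stats
-- ===== SOURCE A (Python) =====
-- from collections import Counter
--
-- def meteor_stats(hypothesis, reference1, reference2, reference3):
--   stats = []
--   hypo_len = len(hypothesis)
--   # Find Closest Reference Length
--   best_match_len = len(reference1)
--   if abs(hypo_len-len(reference2))< abs(hypo_len-best_match_len):
--     best_match_len = len(reference2)
--   if abs(hypo_len-len(reference3))< abs(hypo_len-best_match_len):
--     best_match_len = len(reference3)
--
--   for n in range(1,3):
--     s_ngrams = Counter([tuple(hypothesis[i:i+n]) for i in range(len(hypothesis)+1-n)])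
--     r1_ngrams = Counter([tuple(reference1[i:i+n]) for i in range(len(reference1)+1-n)])
--     r2_ngrams = Counter([tuple(reference2[i:i+n]) for i in range(len(reference2)+1-n)])
--     r3_ngrams = Counter([tuple(reference3[i:i+n]) for i in range(len(reference3)+1-n)])
--     stats.append(max([sum(((s_ngrams & r1_ngrams) | (s_ngrams & r2_ngrams) | (s_ngrams & r3_ngrams)).values()), 0]))
--   stats.append(max([len(hypothesis)+1-1, 0])) # For Unigram Precision
--   stats.append(max([best_match_len+1-1, 0])) # For Unigram Recall
--   return stats
-- ===== SOURCE B (Python) =====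
-- def _ngrams(tokens, n):
--     return [tuple(tokens[i:i + n]) for i in range(len(tokens) + 1 - n)]
--
--
-- def meteor_stats(hypothesis, reference1, reference2, reference3):
--     hypo_len = len(hypothesis)
--     best_match_len = min([len(reference1), len(reference2), len(reference3)],
--                          key=lambda L: abs(hypo_len - L))
--     stats = []
--     for n in (1, 2):
--         h = _ngrams(hypothesis, n)
--         r1 = _ngrams(reference1, n)
--         r2 = _ngrams(reference2, n)
--         r3 = _ngrams(reference3, n)
--         matched = 0
--         # Greedy clipped matching: hypothesis occurrence i of gram g is matched
--         # iff earlier occurrences have not yet used up g's best reference count.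
--         for i, g in enumerate(h):
--             budget = max(r1.count(g), r2.count(g), r3.count(g))
--             if h[:i].count(g) < budget:
--                 matched += 1
--         stats.append(matched)
--     stats.append(hypo_len)
--     stats.append(best_match_len)
--     return stats
-- ===== Notes on version B (the rewrite author's own statement) =====
-- stated objective: alternative
-- what changed: B drops Counters/dicts entirely: for each n it scans the hypothesis n-gram occurrences once and counts an occurrence as matched iff the number of earlier equal occurrences is below the best of the three references' counts of that n-gram (counts obtained by direct list.count), instead of A's six Counter intersection/union operations; the best-match-length if-chain becomes a keyed min over the three reference lengths.
import Mathlib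
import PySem

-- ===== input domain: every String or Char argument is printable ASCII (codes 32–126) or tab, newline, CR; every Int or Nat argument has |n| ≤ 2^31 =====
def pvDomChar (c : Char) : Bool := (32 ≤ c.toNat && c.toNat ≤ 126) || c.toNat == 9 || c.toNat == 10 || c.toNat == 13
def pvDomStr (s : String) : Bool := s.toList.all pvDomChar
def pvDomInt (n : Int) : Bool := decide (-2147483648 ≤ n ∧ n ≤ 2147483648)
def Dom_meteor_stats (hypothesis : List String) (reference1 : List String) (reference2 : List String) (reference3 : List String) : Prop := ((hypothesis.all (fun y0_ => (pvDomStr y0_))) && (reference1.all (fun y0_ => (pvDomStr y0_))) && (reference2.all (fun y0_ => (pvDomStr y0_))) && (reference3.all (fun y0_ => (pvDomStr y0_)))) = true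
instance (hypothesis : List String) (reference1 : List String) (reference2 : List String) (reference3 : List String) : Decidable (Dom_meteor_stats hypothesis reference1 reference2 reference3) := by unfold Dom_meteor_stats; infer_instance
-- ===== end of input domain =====

-- B replaces A's six Counter intersections/unions by a counter-free greedy scan over the
-- hypothesis n-gram occurrences (an occurrence is matched iff earlier equal occurrences have
-- not used up the best reference count) and a keyed min for the closest reference length;
-- objective: alternative (no hashing, different algorithm, similar small-input cost). A = B on all inputs.


-- ===== PORT A =====
-- [tuple(xs[i:i+n]) for i in range(len(xs)+1-n)]  (helper shared by both ports: both Pythons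
-- build their n-gram lists with this same comprehension)
def pvNgrams (xs : List String) (n : Int) : List (List String) :=
  (PySem.List.pyRange 0 (PySem.List.len xs + 1 - n) 1).map
    (fun i => PySem.List.slice xs (some i) (some (i + n)))

-- collections.Counter.__and__ (CPython: keep min(count, other[elem]) when positive)
def pvCounterAnd (c d : PySem.Dict (List String) Int) : PySem.Dict (List String) Int :=
  c.items.foldl (fun r p =>
    let other_count := d.getD p.1 0
    let newcount := if p.2 < other_count then p.2 else other_count
    if 0 < newcount then r.insert p.1 newcount else r) PySem.Dict.empty

-- collections.Counter.__or__ (CPython: max over c's items, then d's items on fresh keys)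
def pvCounterOr (c d : PySem.Dict (List String) Int) : PySem.Dict (List String) Int :=
  let r := c.items.foldl (fun r p =>
    let other_count := d.getD p.1 0
    let newcount := if p.2 < other_count then other_count else p.2
    if 0 < newcount then r.insert p.1 newcount else r) PySem.Dict.empty
  d.items.foldl (fun r p =>
    if c.contains p.1 = false ∧ 0 < p.2 then r.insert p.1 p.2 else r) r

def meteor_stats (hypothesis : List String) (reference1 : List String) (reference2 : List String) (reference3 : List String) : List Int :=
  let stats : List Int := []
  let hypo_len := PySem.List.len hypothesis
  let best_match_len := PySem.List.len reference1
  let best_match_len := if |hypo_len - PySem.List.len reference2| < |hypo_len - best_match_len| then PySem.List.len reference2 else best_match_len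
  let best_match_len := if |hypo_len - PySem.List.len reference3| < |hypo_len - best_match_len| then PySem.List.len reference3 else best_match_len
  let stats := (PySem.List.pyRange 1 3 1).foldl (fun stats n =>
    let s_ngrams := PySem.Dict.counter (pvNgrams hypothesis n)
    let r1_ngrams := PySem.Dict.counter (pvNgrams reference1 n)
    let r2_ngrams := PySem.Dict.counter (pvNgrams reference2 n)
    let r3_ngrams := PySem.Dict.counter (pvNgrams reference3 n)
    stats ++ [max ((pvCounterOr (pvCounterOr (pvCounterAnd s_ngrams r1_ngrams) (pvCounterAnd s_ngrams r2_ngrams)) (pvCounterAnd s_ngrams r3_ngrams)).values.sum) 0]) stats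
  let stats := stats ++ [max (PySem.List.len hypothesis + 1 - 1) 0]
  stats ++ [max (best_match_len + 1 - 1) 0]

-- ===== PORT B =====
def meteor_stats_alt (hypothesis : List String) (reference1 : List String) (reference2 : List String) (reference3 : List String) : List Int :=
  let hypo_len := PySem.List.len hypothesis
  let best_match_len :=
    match PySem.List.min? [PySem.List.len reference1, PySem.List.len reference2, PySem.List.len reference3]
        (fun L => |hypo_len - L|) with
    | some m => m
    | none => 0  -- unreachable: the list is a 3-element literal
  let stats := ([1, 2] : List Int).foldl (fun stats n =>
    let h := pvNgrams hypothesis n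
    let r1 := pvNgrams reference1 n
    let r2 := pvNgrams reference2 n
    let r3 := pvNgrams reference3 n
    let matched := (PySem.List.enumerate h).foldl (fun matched q =>
      let g := q.2
      let budget := max (max ((r1.count g : Int)) ((r2.count g : Int))) ((r3.count g : Int))
      -- h[:i].count(g): i = enumerate index, always 0 ≤ i
      if (((PySem.List.slice h none (some q.1)).count g : Int)) < budget then matched + 1 else matched) 0
    stats ++ [matched]) ([] : List Int)
  (stats ++ [hypo_len]) ++ [best_match_len]

-- ===== PRECONDITION & SPEC =====
def Spec_meteor_stats (hypothesis : List String) (reference1 : List String) (reference2 : List String) (reference3 : List String) (out : List Int) : Prop := out = meteor_stats_alt hypothesis reference1 reference2 reference3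
instance (hypothesis : List String) (reference1 : List String) (reference2 : List String) (reference3 : List String) (out : List Int) : Decidable (Spec_meteor_stats hypothesis reference1 reference2 reference3 out) := by unfold Spec_meteor_stats; infer_instance

-- ===== CLAIM (what is proved, stated in full; the proofs are below) =====
def Claim_equal_meteor_stats : Prop := ∀ (hypothesis : List String) (reference1 : List String) (reference2 : List String) (reference3 : List String), Dom_meteor_stats hypothesis reference1 reference2 reference3 → Spec_meteor_stats hypothesis reference1 reference2 reference3 (meteor_stats hypothesis reference1 reference2 reference3)

-- ===== LEMMAS AND PROOFS =====

theorem pvGetD_ifinsert {K : Type} [BEq K] [LawfulBEq K] (L : List K) (P : K → Prop)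
    [DecidablePred P] (F : K → Int) (d : PySem.Dict K Int) (g : K) :
    (L.foldl (fun r k => if P k then r.insert k (F k) else r) d).getD g 0
      = if g ∈ L ∧ P g then F g else d.getD g 0 := by
  induction L generalizing d with
  | nil => simp
  | cons k L ih =>
    simp only [List.foldl_cons, ih, List.mem_cons]
    by_cases hP : P k <;> by_cases hg : g = k <;>
      simp_all [PySem.Dict.getD_insert_self, PySem.Dict.getD_insert_of_ne]

theorem pvMemKeys_ifinsert {K : Type} [BEq K] [LawfulBEq K] (L : List K) (P : K → Prop)
    [DecidablePred P] (F : K → Int) (d : PySem.Dict K Int) (x : K) :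
    (x ∈ (L.foldl (fun r k => if P k then r.insert k (F k) else r) d).keys)
      ↔ ((x ∈ L ∧ P x) ∨ x ∈ d.keys) := by
  induction L generalizing d with
  | nil => simp
  | cons k L ih =>
    simp only [List.foldl_cons, ih, List.mem_cons]
    by_cases hP : P k <;> by_cases hx : x = k <;>
      simp_all [PySem.Dict.mem_keys_insert]

theorem pvNodup_ifinsert {K : Type} [BEq K] [LawfulBEq K] (L : List K) (P : K → Prop)
    [DecidablePred P] (F : K → Int) (d : PySem.Dict K Int) (h : d.keys.Nodup) :
    (L.foldl (fun r k => if P k then r.insert k (F k) else r) d).keys.Nodup := by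
  induction L generalizing d with
  | nil => simpa
  | cons k L ih =>
    simp only [List.foldl_cons]
    split
    · exact ih _ (PySem.Dict.nodup_keys_insert _ _ _ h)
    · exact ih _ h

theorem pvItems_eq_map_keys {K : Type} [BEq K] [LawfulBEq K] (d : PySem.Dict K Int)
    (h : d.keys.Nodup) : d.items = d.keys.map (fun k => (k, d.getD k 0)) := by
  have : d.keys.map (fun k => (k, d.getD k 0)) = d.items.map (fun p => (p.1, d.getD p.1 0)) := by
    simp only [PySem.Dict.keys, List.map_map]; rfl
  rw [this]
  conv_lhs => rw [← List.map_id d.items]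
  apply List.map_congr_left
  intro p hp
  have := PySem.Dict.getD_of_mem_items (k := p.1) (v := p.2) (d0 := 0) (d := d) (by simpa using hp) h
  simp [this]

theorem pvSum_filter_pos (L : List (List String)) (h : List String → Int)
    (hz : ∀ x ∈ L, ¬ 0 < h x → h x = 0) :
    (L.map h).sum = ((L.filter (fun x => decide (0 < h x))).map h).sum := by
  induction L with
  | nil => simp
  | cons x L ih =>
    have ih' := ih (fun y hy => hz y (List.mem_cons_of_mem _ hy))
    by_cases hx : 0 < h x
    · simp [hx, ih']
    · simp [ih', hz x (List.mem_cons_self) hx]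

theorem pvIteMin (a b : Int) : (if a < b then a else b) = min a b := by split_ifs <;> omega
theorem pvIteMax (a b : Int) : (if a < b then b else a) = max a b := by split_ifs <;> omega

def pvReps (S : List (List String)) (f : List String → Int) (d : PySem.Dict (List String) Int) : Prop :=
  (∀ g, d.getD g 0 = if g ∈ S ∧ 0 < f g then f g else 0)
  ∧ (∀ x, x ∈ d.keys ↔ x ∈ S ∧ 0 < f x) ∧ d.keys.Nodup

theorem pvAnd_reps (S R : List (List String)) :
    pvReps S (fun g => min (S.count g : Int) (R.count g : Int))
      (pvCounterAnd (PySem.Dict.counter S) (PySem.Dict.counter R)) := by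
  have hrw : pvCounterAnd (PySem.Dict.counter S) (PySem.Dict.counter R)
      = (PySem.Set.ofList S).foldl (fun r k =>
          if 0 < min (S.count k : Int) (R.count k : Int)
          then r.insert k (min (S.count k : Int) (R.count k : Int)) else r) PySem.Dict.empty := by
    unfold pvCounterAnd
    rw [PySem.Dict.items_counter, List.foldl_map]
    congr 1
    funext r k
    simp only [PySem.Dict.getD_counter, pvIteMin]
  rw [hrw]
  refine ⟨fun g => ?_, fun x => ?_, ?_⟩
  · rw [pvGetD_ifinsert]
    simp [PySem.Set.mem_ofList]
  · rw [pvMemKeys_ifinsert]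
    simp [PySem.Set.mem_ofList]
  · exact pvNodup_ifinsert _ _ _ _ (by simp)

theorem pvOr_reps (S : List (List String)) (f g' : List String → Int)
    (c d : PySem.Dict (List String) Int) (hc : pvReps S f c) (hd : pvReps S g' d) :
    pvReps S (fun k => max (f k) (g' k)) (pvCounterOr c d) := by
  obtain ⟨hcg, hck, hcn⟩ := hc
  obtain ⟨hdg, hdk, hdn⟩ := hd
  have hcontains : ∀ x, c.contains x = false ↔ ¬ (x ∈ S ∧ 0 < f x) := by
    intro x
    rw [← hck x, ← PySem.Dict.contains_iff_mem_keys]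
    simp
  unfold pvCounterOr
  rw [pvItems_eq_map_keys c hcn, pvItems_eq_map_keys d hdn, List.foldl_map, List.foldl_map]
  simp only [pvIteMax]
  refine ⟨fun x => ?_, fun x => ?_, ?_⟩
  · rw [pvGetD_ifinsert, pvGetD_ifinsert]
    have h1 := hcg x
    have h2 := hdg x
    have h3 := hck x
    have h4 := hdk x
    have h5 := hcontains x
    by_cases hx : x ∈ S <;> by_cases hf : 0 < f x <;> by_cases hg : 0 < g' x <;>
      simp_all <;> omega
  · rw [pvMemKeys_ifinsert, pvMemKeys_ifinsert]
    have h1 := hcg x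
    have h2 := hdg x
    have h3 := hck x
    have h4 := hdk x
    have h5 := hcontains x
    by_cases hx : x ∈ S <;> by_cases hf : 0 < f x <;> by_cases hg : 0 < g' x <;>
      simp_all <;> omega
  · exact pvNodup_ifinsert _ _ _ _ (pvNodup_ifinsert _ _ _ _ (by simp))

def pvF3 (hyp r1 r2 r3 : List String) (n : Int) (k : List String) : Int :=
  max (max (min ((pvNgrams hyp n).count k : Int) ((pvNgrams r1 n).count k : Int))
           (min ((pvNgrams hyp n).count k : Int) ((pvNgrams r2 n).count k : Int)))
      (min ((pvNgrams hyp n).count k : Int) ((pvNgrams r3 n).count k : Int))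

theorem pvReps_sum (S : List (List String)) (F : List String → Int)
    (d : PySem.Dict (List String) Int) (h : pvReps S F d) :
    d.values.sum
      = (((PySem.Set.ofList S).filter (fun k => decide (0 < F k))).map F).sum := by
  obtain ⟨hgd, hk, hn⟩ := h
  have hvals : d.values = d.keys.map (fun k => d.getD k 0) := by
    show d.items.map Prod.snd = _
    rw [pvItems_eq_map_keys d hn, List.map_map]
    rfl
  rw [hvals]
  have hcongr : ∀ k ∈ d.keys, d.getD k 0 = F k := by
    intro k hkk
    have hm := (hk k).1 hkk
    rw [hgd]
    simp [hm]
  rw [List.map_congr_left hcongr]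
  have hperm : d.keys.Perm ((PySem.Set.ofList S).filter (fun k => decide (0 < F k))) := by
    rw [List.perm_ext_iff_of_nodup hn (List.Nodup.filter _ (PySem.Set.nodup_ofList S))]
    intro a
    simp [hk a, PySem.Set.mem_ofList, List.mem_filter]
  exact (hperm.map F).sum_eq

theorem pvFilter_sum_nonneg (S : List (List String)) (F : List String → Int) :
    0 ≤ (((PySem.Set.ofList S).filter (fun k => decide (0 < F k))).map F).sum := by
  apply List.sum_nonneg
  intro x hx
  obtain ⟨k, hk, rfl⟩ := List.mem_map.1 hx
  have := (List.mem_filter.1 hk).2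
  simp at this
  omega

-- ===== B-side: the greedy per-occurrence scan equals the per-distinct-gram min-sum =====

-- Σ_{g ∈ U} min(p.count g, m g)
def pvFsum (U : List (List String)) (m : List String → Int) (p : List (List String)) : Int :=
  (U.map (fun g => min ((p.count g : Int)) (m g))).sum

theorem pvSum_map_update (U : List (List String)) (f f' : List String → Int) (g : List String)
    (hU : U.Nodup) (hg : g ∈ U) (hoth : ∀ k ∈ U, k ≠ g → f k = f' k) :
    (U.map f).sum = (U.map f').sum + (f g - f' g) := by
  induction U with
  | nil => cases hg
  | cons k U ih =>
    rcases List.mem_cons.1 hg with rfl | hgU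
    · have : ∀ x ∈ U, f x = f' x := by
        intro x hx
        exact hoth x (List.mem_cons_of_mem _ hx) (fun hxg => (List.nodup_cons.1 hU).1 (hxg ▸ hx))
      simp [List.map_congr_left this]; ring
    · have hk : f k = f' k :=
        hoth k List.mem_cons_self (fun hkg => (List.nodup_cons.1 hU).1 (hkg ▸ hgU))
      have := ih (List.nodup_cons.1 hU).2 hgU
        (fun x hx hxg => hoth x (List.mem_cons_of_mem _ hx) hxg)
      simp [hk, this]; ring

theorem pvFsum_step (U : List (List String)) (m : List String → Int)
    (p : List (List String)) (g : List String) (hU : U.Nodup) (hg : g ∈ U) :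
    pvFsum U m (p ++ [g]) = pvFsum U m p + (if ((p.count g : Int)) < m g then 1 else 0) := by
  unfold pvFsum
  have hoth : ∀ k ∈ U, k ≠ g →
      (fun k => min (((p ++ [g]).count k : Int)) (m k)) k
        = (fun k => min ((p.count k : Int)) (m k)) k := by
    intro k _ hkg
    have h0 : [g].count k = 0 := List.count_eq_zero.2 (by simp [hkg])
    simp [List.count_append, h0]
  rw [pvSum_map_update U (fun k => min (((p ++ [g]).count k : Int)) (m k))
      (fun k => min ((p.count k : Int)) (m k)) g hU hg hoth]
  have hc : ((p ++ [g]).count g : Int) = (p.count g : Int) + 1 := by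
    simp [List.count_append]
  simp only [hc]
  split_ifs <;> omega

theorem pvGo (h : List (List String)) (m : List String → Int) :
    ∀ (rest p : List (List String)) (acc : Int), h = p ++ rest →
    (PySem.List.enumerate rest ((p.length : Int))).foldl
      (fun matched q =>
        if (((PySem.List.slice h none (some q.1)).count q.2 : Int)) < m q.2
        then matched + 1 else matched) acc
      = acc + (pvFsum (PySem.Set.ofList h) m (p ++ rest) - pvFsum (PySem.Set.ofList h) m p) := by
  intro rest
  induction rest with
  | nil => intro p acc _; simp [PySem.List.enumerate_nil]
  | cons g rest ih =>
    intro p acc hpr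
    rw [PySem.List.enumerate_cons, List.foldl_cons]
    have hslice : PySem.List.slice h none (some ((p.length : Int))) = p := by
      rw [PySem.List.slice_to_natCast, hpr, List.take_left]
    have hgU : g ∈ PySem.Set.ofList h := by
      rw [PySem.Set.mem_ofList, hpr]
      simp
    have hlen : ((p.length : Int)) + 1 = (((p ++ [g]).length : Int)) := by
      simp
    have hpr' : h = (p ++ [g]) ++ rest := by simp [hpr]
    rw [hslice, hlen]
    rw [ih (p ++ [g]) _ hpr']
    rw [pvFsum_step _ m p g (PySem.Set.nodup_ofList h) hgU]
    have : (p ++ [g]) ++ rest = p ++ (g :: rest) := by simp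
    rw [this]
    split_ifs <;> ring

theorem pvStatB (hyp r1 r2 r3 : List String) (n : Int) :
    (PySem.List.enumerate (pvNgrams hyp n)).foldl
      (fun matched q =>
        if (((PySem.List.slice (pvNgrams hyp n) none (some q.1)).count q.2 : Int))
            < max (max (((pvNgrams r1 n).count q.2 : Int)) (((pvNgrams r2 n).count q.2 : Int)))
                (((pvNgrams r3 n).count q.2 : Int))
        then matched + 1 else matched) 0
    = (((PySem.Set.ofList (pvNgrams hyp n)).filter
        (fun k => decide (0 < pvF3 hyp r1 r2 r3 n k))).map (pvF3 hyp r1 r2 r3 n)).sum := by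
  have h0 := pvGo (pvNgrams hyp n)
    (fun g => max (max (((pvNgrams r1 n).count g : Int)) (((pvNgrams r2 n).count g : Int)))
        (((pvNgrams r3 n).count g : Int))) (pvNgrams hyp n) [] 0 (by simp)
  simp only [List.length_nil, Nat.cast_zero, List.nil_append] at h0
  rw [h0]
  have hempty : pvFsum (PySem.Set.ofList (pvNgrams hyp n))
      (fun g => max (max (((pvNgrams r1 n).count g : Int)) (((pvNgrams r2 n).count g : Int)))
        (((pvNgrams r3 n).count g : Int))) [] = 0 := by
    unfold pvFsum
    have : ∀ g ∈ PySem.Set.ofList (pvNgrams hyp n),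
        min ((([] : List (List String)).count g : Int))
          (max (max (((pvNgrams r1 n).count g : Int)) (((pvNgrams r2 n).count g : Int)))
            (((pvNgrams r3 n).count g : Int))) = 0 := by
      intro g _
      simp
    rw [List.map_congr_left this]
    simp
  rw [hempty]
  unfold pvFsum
  have hpt : ∀ g ∈ PySem.Set.ofList (pvNgrams hyp n),
      min (((pvNgrams hyp n).count g : Int))
        (max (max (((pvNgrams r1 n).count g : Int)) (((pvNgrams r2 n).count g : Int)))
          (((pvNgrams r3 n).count g : Int)))
      = pvF3 hyp r1 r2 r3 n g := by
    intro g _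
    unfold pvF3
    omega
  rw [List.map_congr_left hpt]
  have hz : ∀ g ∈ PySem.Set.ofList (pvNgrams hyp n),
      ¬ 0 < pvF3 hyp r1 r2 r3 n g → pvF3 hyp r1 r2 r3 n g = 0 := by
    intro g hg hnp
    have hmem : g ∈ pvNgrams hyp n := (PySem.Set.mem_ofList _ _).1 hg
    have hcnt : 0 < (pvNgrams hyp n).count g := List.count_pos_iff.2 hmem
    unfold pvF3 at *
    omega
  rw [pvSum_filter_pos _ _ hz]
  ring

theorem pvStat_eq (hyp r1 r2 r3 : List String) (n : Int) :
    max ((pvCounterOr (pvCounterOr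
          (pvCounterAnd (PySem.Dict.counter (pvNgrams hyp n)) (PySem.Dict.counter (pvNgrams r1 n)))
          (pvCounterAnd (PySem.Dict.counter (pvNgrams hyp n)) (PySem.Dict.counter (pvNgrams r2 n))))
          (pvCounterAnd (PySem.Dict.counter (pvNgrams hyp n)) (PySem.Dict.counter (pvNgrams r3 n)))).values.sum) 0
    = (PySem.List.enumerate (pvNgrams hyp n)).foldl
      (fun matched q =>
        if (((PySem.List.slice (pvNgrams hyp n) none (some q.1)).count q.2 : Int))
            < max (max (((pvNgrams r1 n).count q.2 : Int)) (((pvNgrams r2 n).count q.2 : Int)))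
                (((pvNgrams r3 n).count q.2 : Int))
        then matched + 1 else matched) 0 := by
  have hreps : pvReps (pvNgrams hyp n) (pvF3 hyp r1 r2 r3 n)
      (pvCounterOr (pvCounterOr
        (pvCounterAnd (PySem.Dict.counter (pvNgrams hyp n)) (PySem.Dict.counter (pvNgrams r1 n)))
        (pvCounterAnd (PySem.Dict.counter (pvNgrams hyp n)) (PySem.Dict.counter (pvNgrams r2 n))))
        (pvCounterAnd (PySem.Dict.counter (pvNgrams hyp n)) (PySem.Dict.counter (pvNgrams r3 n)))) :=
    pvOr_reps _ _ _ _ _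
      (pvOr_reps _ _ _ _ _ (pvAnd_reps (pvNgrams hyp n) (pvNgrams r1 n))
        (pvAnd_reps (pvNgrams hyp n) (pvNgrams r2 n)))
      (pvAnd_reps (pvNgrams hyp n) (pvNgrams r3 n))
  rw [pvReps_sum _ _ _ hreps, pvStatB]
  have := pvFilter_sum_nonneg (pvNgrams hyp n) (pvF3 hyp r1 r2 r3 n)
  omega

theorem pvBest_eq (a l1 l2 l3 : Int) :
    (if |a - l3| < |a - (if |a - l2| < |a - l1| then l2 else l1)|
     then l3 else (if |a - l2| < |a - l1| then l2 else l1))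
    = (match PySem.List.min? [l1, l2, l3] (fun L => |a - L|) with
       | some m => m | none => 0) := by
  simp only [PySem.List.min?, List.foldl_cons, List.foldl_nil]
  by_cases h : |a - l2| < |a - l1| <;> simp [h] <;> split_ifs <;> rfl

-- ===== VERDICT (by name: the statement is the Claim_ definition above) =====
theorem meteor_stats_spec : Claim_equal_meteor_stats := by
  intro hyp r1 r2 r3 _
  show _ = _
  unfold meteor_stats meteor_stats_alt
  have hrange : PySem.List.pyRange 1 3 1 = [1, 2] := by decide
  rw [hrange]
  have h1 := pvStat_eq hyp r1 r2 r3 1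
  have h2 := pvStat_eq hyp r1 r2 r3 2
  have hb := pvBest_eq (PySem.List.len hyp) (PySem.List.len r1) (PySem.List.len r2)
    (PySem.List.len r3)
  have hlh : 0 ≤ PySem.List.len hyp := by simp [PySem.List.len_eq]
  have hl1 : 0 ≤ PySem.List.len r1 := by simp [PySem.List.len_eq]
  have hl2 : 0 ≤ PySem.List.len r2 := by simp [PySem.List.len_eq]
  have hl3 : 0 ≤ PySem.List.len r3 := by simp [PySem.List.len_eq]
  simp only [List.foldl_cons, List.foldl_nil, List.nil_append, List.cons_append] at h1 h2 ⊢
  rw [h1, h2, ← hb]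
  simp only [List.cons.injEq]
  exact ⟨trivial, trivial, by omega, by split_ifs <;> omega, trivial⟩
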